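-- pv_equiv track=rewrite | github.com/RochaBraulio/6_100L_classwork_mitx | finger-exercises/lecture-9/mit6_100l_f22_ex09_sol.py | dot_product
-- ===== SOURCE A (Python) =====
-- def dot_product(tA, tB):
--     """
--     tA: a tuple of numbers
--     tB: a tuple of numbers of the same length as tA
--     Assumes tA and tB are the same length.
--     Returns a tuple where the:
--     * first element is the length of one of the tuples
--     * second element is the sum of the pairwise products of tA and tB
--     """
--     (len_tuple, pairwise_product, sum_pairwise_prod) = (0,[], 0)
--     len_tuple = len(tA) # assuming tA and tB are of the same length, it does
--     # not matter which one is passed as argument to len()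
--     for i in range(len_tuple):
--         # create list with pairwise products from tA * tB
--         pairwise_product.append(tA[i] * tB[i])
--     for el in pairwise_product:
--         # loops over previous list and sums up its element
--         sum_pairwise_prod += el
--     return(len_tuple, sum_pairwise_prod)
--
-- tA = (1, 2, 3)
--
-- tB = (4, 5, 6)
-- ===== SOURCE B (Python) =====
-- def dot_product(tA, tB):
--     """Single pass: length up front, scalar accumulator over zip; no intermediate list."""
--     total = 0
--     for a, b in zip(tA, tB):
--         total += a * b
--     return (len(tA), total)
-- ===== Notes on version B (the rewrite author's own statement) =====
-- stated objective: simpler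
-- what changed: B fuses A's two loops (build pairwise_product list, then sum it) into a single pass over zip(tA, tB) with one scalar accumulator and no intermediate list.
import Mathlib
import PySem

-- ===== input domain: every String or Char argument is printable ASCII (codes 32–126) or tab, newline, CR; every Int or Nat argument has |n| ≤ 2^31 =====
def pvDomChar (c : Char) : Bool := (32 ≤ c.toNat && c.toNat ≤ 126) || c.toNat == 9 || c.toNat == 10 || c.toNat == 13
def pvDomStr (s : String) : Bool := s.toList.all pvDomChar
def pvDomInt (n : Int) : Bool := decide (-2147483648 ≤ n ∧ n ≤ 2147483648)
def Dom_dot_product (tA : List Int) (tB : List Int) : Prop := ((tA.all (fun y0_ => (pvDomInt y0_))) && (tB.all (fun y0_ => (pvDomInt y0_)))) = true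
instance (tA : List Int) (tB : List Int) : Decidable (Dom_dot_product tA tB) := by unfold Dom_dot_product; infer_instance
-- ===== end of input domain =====

-- B fuses A's two loops (build the pairwise-product list, then sum it) into one zip pass
-- with a scalar accumulator; equivalence of RETURN VALUES is proved on Pre_ (len tA ≤ len tB).
-- ===== PORT A =====
def dot_product (tA : List Int) (tB : List Int) : Int × Int :=
  -- (len_tuple, pairwise_product, sum_pairwise_prod) = (0, [], 0); len_tuple = len(tA)
  let len_tuple : Int := (tA.length : Int)
  -- for i in range(len_tuple): pairwise_product.append(tA[i] * tB[i])
  let pairwise_product : List Int :=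
    (PySem.List.pyRange 0 len_tuple 1).foldl
      (fun acc i => acc ++ [PySem.List.pyGetD tA i 0 * PySem.List.pyGetD tB i 0]) []
  -- for el in pairwise_product: sum_pairwise_prod += el
  let sum_pairwise_prod : Int := pairwise_product.foldl (fun acc el => acc + el) 0
  (len_tuple, sum_pairwise_prod)

-- ===== PORT B =====
def dot_product_alt (tA : List Int) (tB : List Int) : Int × Int :=
  -- total = 0; for a, b in zip(tA, tB): total += a * b
  let total : Int := (tA.zip tB).foldl (fun total p => total + p.1 * p.2) 0
  ((tA.length : Int), total)

-- ===== PRECONDITION & SPEC =====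
-- Pre_ excludes tA longer than tB: there A raises IndexError at tB[i] (B would return (len tA, sum over the zipped prefix)).
def Pre_dot_product (tA : List Int) (tB : List Int) : Prop := tA.length ≤ tB.length
instance (tA : List Int) (tB : List Int) : Decidable (Pre_dot_product tA tB) := by
  unfold Pre_dot_product; infer_instance
def pvWitness_dot_product : List Int × List Int := ([1, 2, 3], [4, 5, 6])

def Spec_dot_product (tA : List Int) (tB : List Int) (out : Int × Int) : Prop := out = dot_product_alt tA tB
instance (tA : List Int) (tB : List Int) (out : Int × Int) : Decidable (Spec_dot_product tA tB out) := by unfold Spec_dot_product; infer_instance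

-- ===== CLAIM (what is proved, stated in full; the proofs are below) =====
def Claim_equal_dot_product : Prop := ∀ (tA : List Int) (tB : List Int), Dom_dot_product tA tB → Pre_dot_product tA tB → Spec_dot_product tA tB (dot_product tA tB)
-- ===== LEMMAS AND PROOFS =====

-- A's pairwise list, as a map over range, equals the zip-product list (when tA is not longer).
lemma pairwise_eq_zip (tA tB : List Int) (h : tA.length ≤ tB.length) :
    (PySem.List.pyRange 0 (tA.length : Int) 1).map
        (fun i => PySem.List.pyGetD tA i 0 * PySem.List.pyGetD tB i 0)
      = (tA.zip tB).map (fun p => p.1 * p.2) := by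
  apply List.ext_getElem
  · simp [PySem.List.length_pyRange_one, List.length_zip]; omega
  · intro k h1 h2
    have hk : k < tA.length := by
      simpa [PySem.List.length_pyRange_one] using h1
    have hkB : k < tB.length := lt_of_lt_of_le hk h
    rw [List.getElem_map, List.getElem_map, PySem.List.getElem_pyRange_one]
    rw [List.getElem_zip]
    simp only [zero_add]
    rw [PySem.List.pyGetD_natCast, PySem.List.pyGetD_natCast]
    simp [hk, hkB]

-- ===== VERDICT (by name: the statement is the Claim_ definition above) =====
theorem dot_product_spec : Claim_equal_dot_product := by
  intro tA tB _ hpre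
  unfold Spec_dot_product dot_product dot_product_alt
  simp only []
  rw [PySem.List.foldl_append_singleton_eq_map, List.nil_append,
      pairwise_eq_zip tA tB hpre]
  have h1 : ((tA.zip tB).map (fun p => p.1 * p.2)).foldl (fun acc el => acc + el) 0
      = 0 + (((tA.zip tB).map (fun p => p.1 * p.2)).map id).sum := by
    simpa using PySem.List.foldl_add (l := (tA.zip tB).map (fun p => p.1 * p.2)) (g := id) (a := 0)
  have h2 : (tA.zip tB).foldl (fun total p => total + p.1 * p.2) 0
      = 0 + ((tA.zip tB).map (fun p => p.1 * p.2)).sum :=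
    PySem.List.foldl_add (l := tA.zip tB) (g := fun p => p.1 * p.2) (a := 0)
  rw [h1, h2]; simp
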